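-- pv_equiv track=rewrite | github.com/DragunWF/Competitive-Programming | CodeWars/python/6_kyu/address_book_by_state.py | by_state
-- ===== SOURCE A (Python) =====
-- def by_state(s: str) -> str:
--     states = {'AZ': 'Arizona',
--               'CA': 'California',
--               'ID': 'Idaho',
--               'IN': 'Indiana',
--               'MA': 'Massachusetts',
--               'OK': 'Oklahoma',
--               'PA': 'Pennsylvania',
--               'VA': 'Virginia'}
--     friends_per_state: dict[str, list[str]] = {}
--
--     friends = s.split("\n")
--     for friend in friends:
--         if not friend:
--             continue
--
--         details = " ".join([item.strip() for item in friend[:-2].split(",")])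
--         state = friend.strip()[-2:]
--         friend_line_item = f"{details} {states[state]}"
--         if not state in friends_per_state:
--             friends_per_state[state] = [friend_line_item]
--         else:
--             friends_per_state[state].append(friend_line_item)
--
--     lines = []
--     for state in states:
--         if state in friends_per_state:
--             lines.append(states[state] if not len(lines) else f" {states[state]}")
--             for friend in sorted(friends_per_state[state]):
--                 lines.append(f"..... {friend}")
--
--     return "\r\n".join(lines)
-- ===== SOURCE B (Python) =====
-- def by_state(s: str) -> str:
--     states = {'AZ': 'Arizona', 'CA': 'California', 'ID': 'Idaho', 'IN': 'Indiana',
--               'MA': 'Massachusetts', 'OK': 'Oklahoma', 'PA': 'Pennsylvania', 'VA': 'Virginia'}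
--     entries = []
--     for friend in s.split("\n"):
--         if not friend:
--             continue
--         details = " ".join(item.strip() for item in friend[:-2].split(","))
--         state = friend.strip()[-2:]
--         entries.append((state, f"{details} {states[state]}"))
--     entries.sort()
--     lines = []
--     prev = None
--     for state, entry in entries:
--         if state != prev:
--             lines.append(states[state] if not lines else f" {states[state]}")
--             prev = state
--         lines.append(f"..... {entry}")
--     return "\r\n".join(lines)
-- ===== Notes on version B (the rewrite author's own statement) =====
-- stated objective: alternative
-- what changed: B drops A's dict-of-lists grouping and per-state sorts: it collects one flat list of (state, entry) pairs, sorts it once lexicographically, and emits the report in a single scan that writes a header whenever the state changes.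
import Mathlib
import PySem

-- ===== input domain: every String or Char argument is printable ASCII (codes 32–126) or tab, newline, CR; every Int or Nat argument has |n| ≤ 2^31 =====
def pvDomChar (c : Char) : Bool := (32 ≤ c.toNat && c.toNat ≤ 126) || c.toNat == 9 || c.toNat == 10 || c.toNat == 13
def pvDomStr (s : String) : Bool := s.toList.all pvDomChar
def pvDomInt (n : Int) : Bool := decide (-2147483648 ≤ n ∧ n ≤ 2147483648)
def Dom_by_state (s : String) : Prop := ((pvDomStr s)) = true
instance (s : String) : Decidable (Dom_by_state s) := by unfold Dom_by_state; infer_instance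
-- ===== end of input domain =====

-- B replaces A's dict-of-lists grouping by one flat list of (state, entry) pairs sorted once and
-- emitted in a single scan (header on state change); objective: alternative structure, same cost.

-- ===== PORT A =====
-- the states dict literal of A (also B's: both Pythons carry the identical literal)
def pvStates : PySem.Dict String String :=
  PySem.Dict.ofList [("AZ","Arizona"),("CA","California"),("ID","Idaho"),("IN","Indiana"),
    ("MA","Massachusetts"),("OK","Oklahoma"),("PA","Pennsylvania"),("VA","Virginia")]

-- s.split("\n"): the separator is the nonempty literal "\n", so Python never raises (split? is some)
def pvLines (s : String) : List String := (PySem.Str.split? s "\n").getD []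

-- line parsing, verbatim identical in A and B (both Pythons contain these exact expressions):
-- details = " ".join([item.strip() for item in friend[:-2].split(",")])
def pvDetails (friend : String) : String :=
  PySem.Str.join " "
    (((PySem.Str.split? (PySem.Str.slice friend none (some (-2))) ",").getD []).map PySem.Str.strip)

-- state = friend.strip()[-2:]
def pvStateOf (friend : String) : String :=
  PySem.Str.slice (PySem.Str.strip friend) (some (-2)) none

-- friend_line_item = f"{details} {states[state]}"; states[state] raises KeyError on an unknown
-- abbreviation — Pre_by_state excludes exactly those inputs, so the .getD "" default is never used
def pvItem (friend : String) : String :=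
  pvDetails friend ++ " " ++ (pvStates.get? (pvStateOf friend)).getD ""

def by_state (s : String) : String :=
  let friends := pvLines s
  let fps : PySem.Dict String (List String) :=
    friends.foldl (fun d friend =>
      if friend = "" then d
      else if d.contains (pvStateOf friend) = false then d.insert (pvStateOf friend) [pvItem friend]
      else d.modify (pvStateOf friend) [] (fun l => l ++ [pvItem friend])) PySem.Dict.empty
  let lines : List String :=
    pvStates.keys.foldl (fun lines st =>
      if fps.contains st then
        (lines ++ [if lines.length = 0 then (pvStates.get? st).getD "" else " " ++ (pvStates.get? st).getD ""])
          ++ (PySem.List.sorted (fps.getD st []) (fun x => x) false).map (fun f => "..... " ++ f)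
      else lines) []
  PySem.Str.join "\r\n" lines

-- ===== PORT B =====
def by_state_alt (s : String) : String :=
  let entries : List (String × String) :=
    (pvLines s).foldl (fun acc friend =>
      if friend = "" then acc else acc ++ [(pvStateOf friend, pvItem friend)]) []
  let sortedE := PySem.List.sorted2 entries (fun e => e.1) (fun e => e.2) false
  let res : List String × Option String := sortedE.foldl (fun p e =>
      let p1 := if some e.1 ≠ p.2 then
          (p.1 ++ [if p.1.length = 0 then (pvStates.get? e.1).getD "" else " " ++ (pvStates.get? e.1).getD ""],
           some e.1)
        else p
      (p1.1 ++ ["..... " ++ e.2], p1.2)) ([], none)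
  PySem.Str.join "\r\n" res.1

-- ===== PRECONDITION & SPEC =====
-- Pre_ excludes exactly the inputs where Python A raises KeyError: some non-empty line whose
-- stripped last two characters are not one of the eight state abbreviations (B raises there too).
def Pre_by_state (s : String) : Prop :=
  ∀ friend ∈ pvLines s, friend ≠ "" → pvStateOf friend ∈ pvStates.keys
instance (s : String) : Decidable (Pre_by_state s) := by unfold Pre_by_state; infer_instance

def pvWitness_by_state : String := "John Daggett, 341 King Road, Plymouth MA\nAlice Ford, 22 East Broadway, Richmond VA"

def Spec_by_state (s : String) (out : String) : Prop := out = by_state_alt s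
instance (s : String) (out : String) : Decidable (Spec_by_state s out) := by unfold Spec_by_state; infer_instance

-- ===== CLAIM (what is proved, stated in full; the proofs are below) =====
def Claim_equal_by_state : Prop := ∀ (s : String), Dom_by_state s → Pre_by_state s → Spec_by_state s (by_state s)

-- ===== LEMMAS AND PROOFS =====

-- proof-side abbreviations
def pvK : List String := ["AZ","CA","ID","IN","MA","OK","PA","VA"]

def pvEntries (s : String) : List (String × String) :=
  ((pvLines s).filter (fun f => f ≠ "")).map (fun f => (pvStateOf f, pvItem f))

def pvGroup (l : List (String × String)) (st : String) : List String :=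
  (l.filter (fun e => e.1 == st)).map (fun e => e.2)

def pvName (st : String) : String := (pvStates.get? st).getD ""

def pvBody (l : List (String × String)) (st : String) : List String :=
  (PySem.List.sorted (pvGroup l st) (fun x => x) false).map (fun f => "..... " ++ f)

def pvBlock (l : List (String × String)) (st : String) : List (String × String) :=
  (PySem.List.sorted (pvGroup l st) (fun x => x) false).map (fun y => (st, y))

def pvC (l : List (String × String)) : List (String × String) := pvK.flatMap (pvBlock l)

def pvBstep (p : List String × Option String) (e : String × String) : List String × Option String :=
  let p1 := if some e.1 ≠ p.2 then
      (p.1 ++ [if p.1.length = 0 then pvName e.1 else " " ++ pvName e.1], some e.1)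
    else p
  (p1.1 ++ ["..... " ++ e.2], p1.2)

def pvAstep (l : List (String × String)) (lines : List String) (st : String) : List String :=
  if pvGroup l st ≠ [] then
    (lines ++ [if lines.length = 0 then pvName st else " " ++ pvName st]) ++ pvBody l st
  else lines

-- keys of the states dict
theorem pvKeys_eq : pvStates.keys = pvK := by decide

-- B's accumulation loop builds pvEntries
theorem entries_eq (s : String) :
    ((pvLines s).foldl (fun acc friend =>
      if friend = "" then acc else acc ++ [(pvStateOf friend, pvItem friend)]) []) = pvEntries s := by
  have h : (fun (acc : List (String × String)) friend =>
      if friend = "" then acc else acc ++ [(pvStateOf friend, pvItem friend)])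
      = (fun acc friend => if (decide (friend ≠ "")) = true then
          acc ++ [(pvStateOf friend, pvItem friend)] else acc) := by
    funext acc f; by_cases hf : f = "" <;> simp [hf]
  rw [h, PySem.List.foldl_append_if]
  simp [pvEntries]

-- A's dict branch is one modify
theorem dict_step_eq (d : PySem.Dict String (List String)) (k v : String) :
    (if d.contains k = false then d.insert k [v] else d.modify k [] (fun l => l ++ [v]))
      = d.modify k [] (fun l => l ++ [v]) := by
  by_cases h : d.contains k
  · simp [h]
  · simp only [Bool.not_eq_true] at h
    simp [h, PySem.Dict.modify, PySem.Dict.getD_of_not_contains d [] h]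

-- A's skip-parse-insert/append loop is the canonical grouping fold over the parsed pairs
theorem fold_dict_eq (s : String) :
    ((pvLines s).foldl (fun d friend =>
      if friend = "" then d
      else if d.contains (pvStateOf friend) = false then d.insert (pvStateOf friend) [pvItem friend]
      else d.modify (pvStateOf friend) [] (fun l => l ++ [pvItem friend])) PySem.Dict.empty)
    = (pvEntries s).foldl (fun d p => d.modify p.1 [] (fun l => l ++ [p.2])) PySem.Dict.empty := by
  have h : (fun (d : PySem.Dict String (List String)) friend =>
      if friend = "" then d
      else if d.contains (pvStateOf friend) = false then d.insert (pvStateOf friend) [pvItem friend]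
      else d.modify (pvStateOf friend) [] (fun l => l ++ [pvItem friend]))
      = (fun d friend => if (decide (friend ≠ "")) = true then
          d.modify (pvStateOf friend) [] (fun l => l ++ [pvItem friend]) else d) := by
    funext d f
    by_cases hf : f = ""
    · simp [hf]
    · simp [hf, dict_step_eq d (pvStateOf f) (pvItem f)]
  rw [h, pvEntries, List.foldl_map, List.foldl_filter]

-- A's dict, per key
theorem fps_getD (s : String) (st : String) :
    (((pvLines s).foldl (fun d friend =>
      if friend = "" then d
      else if d.contains (pvStateOf friend) = false then d.insert (pvStateOf friend) [pvItem friend]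
      else d.modify (pvStateOf friend) [] (fun l => l ++ [pvItem friend])) PySem.Dict.empty).getD st [])
      = pvGroup (pvEntries s) st := by
  rw [fold_dict_eq, PySem.Dict.getD_foldl_modify_append]
  simp [pvGroup, PySem.Dict.getD_empty]

theorem fps_contains (s : String) (st : String) :
    (((pvLines s).foldl (fun d friend =>
      if friend = "" then d
      else if d.contains (pvStateOf friend) = false then d.insert (pvStateOf friend) [pvItem friend]
      else d.modify (pvStateOf friend) [] (fun l => l ++ [pvItem friend])) PySem.Dict.empty).contains st)
      = decide (pvGroup (pvEntries s) st ≠ []) := by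
  rw [fold_dict_eq]
  have hk := PySem.Dict.keys_foldl_modify_key (pvEntries s) (fun p => p.1) []
    (fun _ p => fun l => l ++ [p.2]) PySem.Dict.empty
  have hiff : ((pvEntries s).foldl (fun d p => d.modify p.1 [] (fun l => l ++ [p.2]))
      PySem.Dict.empty).contains st = true ↔ pvGroup (pvEntries s) st ≠ [] := by
    rw [PySem.Dict.contains_iff_mem_keys, hk]
    rw [show (PySem.Dict.empty : PySem.Dict String (List String)).keys = [] from rfl,
      PySem.Set.update_nil_left, PySem.Set.mem_ofList]
    simp only [pvGroup, ne_eq, List.map_eq_nil_iff, List.filter_eq_nil_iff, List.mem_map]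
    constructor
    · rintro ⟨e, he, rfl⟩ hall; exact hall e he (by simp)
    · intro hne
      by_contra hno
      exact hne (fun e he hbe => hno ⟨e, he, (by simpa using hbe)⟩)
  by_cases hgr : pvGroup (pvEntries s) st = []
  · simp only [hgr, ne_eq, not_true_eq_false, decide_false]
    simp [hgr] at hiff
    simpa using hiff
  · simp only [hgr, ne_eq, not_false_eq_true, decide_true]
    exact hiff.mpr hgr

-- sorted2 on pairs is sorted by the lexicographic key
theorem sorted2_eq_lex (l : List (String × String)) :
    PySem.List.sorted2 l (fun e => e.1) (fun e => e.2) false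
      = PySem.List.sorted l (fun e => toLex e) false := by
  have h : (fun (a b : String × String) =>
        decide (a.1 < b.1) || (!decide (b.1 < a.1) && decide (a.2 < b.2)))
      = (fun (a b : String × String) => decide (toLex a < toLex b)) := by
    funext p q
    by_cases h1 : p.1 < q.1
    · simp [h1, Prod.Lex.toLex_lt_toLex]
    · by_cases h2 : q.1 < p.1
      · have hne : ¬ (toLex p < toLex q) := fun hlt => by
          rcases Prod.Lex.toLex_lt_toLex.mp hlt with hcase | ⟨he, _⟩
          · exact h1 hcase
          · exact absurd h2 (by rw [he]; exact lt_irrefl _)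
        simp [h1, h2, hne]
      · have he : p.1 = q.1 := le_antisymm (not_lt.mp h2) (not_lt.mp h1)
        by_cases h3 : p.2 < q.2 <;>
          simp [h3, Prod.Lex.toLex_lt_toLex, he]
  unfold PySem.List.sorted2 PySem.List.sorted
  simp only [Bool.false_eq_true, if_false]
  rw [h]

-- a filtered block put back together is the filter itself
theorem filter_reconstruct (l : List (String × String)) (st : String) :
    (pvGroup l st).map (fun y => (st, y)) = l.filter (fun e => e.1 == st) := by
  rw [pvGroup, List.map_map]
  conv_rhs => rw [← List.map_id (l.filter (fun e => e.1 == st))]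
  apply List.map_congr_left
  intro e he
  have hst : e.1 = st := by simpa using List.of_mem_filter he
  cases e
  simp_all

-- filtering by each key of a covering duplicate-free key list is a permutation
theorem flatMap_filter_perm : ∀ (K : List String) (l : List (String × String)), K.Nodup →
    (∀ e ∈ l, e.1 ∈ K) → (K.flatMap (fun st => l.filter (fun e => e.1 == st))).Perm l := by
  intro K
  induction K with
  | nil =>
    intro l _ h
    have : l = [] := List.eq_nil_iff_forall_not_mem.mpr (fun e he => by simpa using h e he)
    simp [this]
  | cons k K ih =>
    intro l hnd h
    rw [List.flatMap_cons]
    have hknk : k ∉ K := (List.nodup_cons.mp hnd).1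
    have hstep : ∀ st ∈ K, l.filter (fun e => e.1 == st)
        = (l.filter (fun e => !(e.1 == k))).filter (fun e => e.1 == st) := by
      intro st hst
      rw [List.filter_filter]
      apply List.filter_congr
      intro e _
      by_cases hse : e.1 = st
      · have hne : st ≠ k := fun hh => hknk (hh ▸ hst)
        simp [hse, hne]
      · simp [hse]
    rw [List.flatMap_congr hstep]
    have ih' := ih (l.filter (fun e => !(e.1 == k))) (List.nodup_cons.mp hnd).2 (by
      intro e he
      have h1 := h e (List.mem_of_mem_filter he)
      have h2 : ¬ (e.1 = k) := by simpa using List.of_mem_filter he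
      rcases List.mem_cons.mp h1 with h1 | h1
      · exact absurd h1 h2
      · exact h1)
    exact (List.Perm.append_left _ ih').trans (List.filter_append_perm _ l)

theorem pvC_perm (l : List (String × String)) (h : ∀ e ∈ l, e.1 ∈ pvK) : (pvC l).Perm l := by
  have hblock : ∀ st, (pvBlock l st).Perm (l.filter (fun e => e.1 == st)) := by
    intro st
    rw [pvBlock, ← filter_reconstruct]
    exact (PySem.List.sorted_perm (pvGroup l st) (fun x => x) false).map _
  have hperm : (pvK.flatMap (pvBlock l)).Perm
      (pvK.flatMap (fun st => l.filter (fun e => e.1 == st))) := by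
    induction pvK with
    | nil => simp
    | cons k K ih => simpa using (hblock k).append ih
  exact hperm.trans (flatMap_filter_perm pvK l (by decide) h)

theorem pvK_pairwise : pvK.Pairwise (· < ·) := by
  have hm : (pvK.map String.toList).Pairwise (· < ·) := by decide
  rw [List.pairwise_map] at hm
  exact hm.imp (fun hab => String.lt_iff_toList_lt.mpr hab)

theorem pairwise_C (l : List (String × String)) :
    (pvC l).Pairwise (fun a b => (fun e : String × String => toLex e) a ≤ (fun e => toLex e) b) := by
  rw [pvC, List.pairwise_flatMap]
  constructor
  · intro st _
    rw [pvBlock, List.pairwise_map]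
    have hp := PySem.List.sorted_pairwise (pvGroup l st) (fun x => x)
    refine hp.imp ?_
    intro a b hab
    exact Prod.Lex.toLex_le_toLex.mpr (Or.inr ⟨rfl, hab⟩)
  · refine pvK_pairwise.imp ?_
    intro s1 s2 hlt x hx y hy
    rcases List.mem_map.mp hx with ⟨a, _, rfl⟩
    rcases List.mem_map.mp hy with ⟨b, _, rfl⟩
    exact le_of_lt (Prod.Lex.toLex_lt_toLex.mpr (Or.inl hlt))

-- the sorted flat list is the concatenation of the per-state blocks
theorem sorted_eq_C (l : List (String × String)) (h : ∀ e ∈ l, e.1 ∈ pvK) :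
    PySem.List.sorted l (fun e => toLex e) false = pvC l := by
  apply PySem.List.eq_of_perm_of_pairwise_le_of_injective (fun e : String × String => toLex e)
    (fun a b hab => toLex_inj.mp hab)
    ((PySem.List.sorted_perm l _ false).trans (pvC_perm l h).symm)
    (PySem.List.sorted_pairwise l _)
    (pairwise_C l)

-- scanning one block whose state is already current just appends the entries
theorem scan_rest (ys : List String) (st : String) (lines : List String) :
    (ys.map (fun y => (st, y))).foldl pvBstep (lines, some st)
      = (lines ++ ys.map (fun f => "..... " ++ f), some st) := by
  induction ys generalizing lines with
  | nil => simp
  | cons y ys ih =>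
    simp only [List.map_cons, List.foldl_cons]
    have hstep : pvBstep (lines, some st) (st, y) = (lines ++ ["..... " ++ y], some st) := by
      simp [pvBstep]
    rw [hstep, ih]
    simp

-- scanning a nonempty block from a different previous state emits the header then the entries
theorem scan_block (y : String) (ys : List String) (st : String) (lines : List String)
    (prev : Option String) (h : prev ≠ some st) :
    ((y :: ys).map (fun y => (st, y))).foldl pvBstep (lines, prev)
      = ((lines ++ [if lines.length = 0 then pvName st else " " ++ pvName st])
          ++ (y :: ys).map (fun f => "..... " ++ f), some st) := by
  simp only [List.map_cons, List.foldl_cons]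
  have hstep : pvBstep (lines, prev) (st, y)
      = ((lines ++ [if lines.length = 0 then pvName st else " " ++ pvName st]) ++ ["..... " ++ y],
          some st) := by
    simp [pvBstep, Ne.symm h]
  rw [hstep, scan_rest]
  simp

def pvPrevAfter (l : List (String × String)) (Ks : List String) (prev : Option String) : Option String :=
  Ks.foldl (fun p st => if pvGroup l st ≠ [] then some st else p) prev

-- the single scan over the concatenated blocks equals A's loop over the states
theorem main_scan (l : List (String × String)) :
    ∀ (Ks : List String) (lines : List String) (prev : Option String),
      Ks.Nodup → (∀ st ∈ Ks, prev ≠ some st) →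
      (Ks.flatMap (pvBlock l)).foldl pvBstep (lines, prev)
        = (Ks.foldl (pvAstep l) lines, pvPrevAfter l Ks prev) := by
  intro Ks
  induction Ks with
  | nil => intro lines prev _ _; simp [pvPrevAfter]
  | cons st Ks ih =>
    intro lines prev hnd hprev
    rw [List.flatMap_cons, List.foldl_append]
    by_cases hgr : pvGroup l st = []
    · have hb : pvBlock l st = [] := by
        simp [pvBlock, PySem.List.sorted_eq_nil_iff, hgr]
      rw [hb]
      simp only [List.foldl_nil]
      rw [ih lines prev (List.nodup_cons.mp hnd).2
        (fun s2 hs2 => hprev s2 (List.mem_cons_of_mem _ hs2))]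
      simp [pvPrevAfter, List.foldl_cons, pvAstep, hgr]
    · obtain ⟨y, ys, hys⟩ : ∃ y ys, PySem.List.sorted (pvGroup l st) (fun x => x) false = y :: ys := by
        cases hs : PySem.List.sorted (pvGroup l st) (fun x => x) false with
        | nil => exact absurd ((PySem.List.sorted_eq_nil_iff _ _ _).mp hs) hgr
        | cons a b => exact ⟨_, _, rfl⟩
      have hb : pvBlock l st = (y :: ys).map (fun y => (st, y)) := by rw [pvBlock, hys]
      rw [hb, scan_block y ys st lines prev (hprev st List.mem_cons_self)]
      rw [ih _ (some st) (List.nodup_cons.mp hnd).2 (fun s2 hs2 he => by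
        injection he with he; exact (List.nodup_cons.mp hnd).1 (he ▸ hs2))]
      have hA : pvAstep l lines st
          = (lines ++ [if lines.length = 0 then pvName st else " " ++ pvName st])
              ++ (y :: ys).map (fun f => "..... " ++ f) := by
        simp [pvAstep, hgr, pvBody, hys]
      rw [List.foldl_cons, hA]
      have hP : pvPrevAfter l (st :: Ks) prev = pvPrevAfter l Ks (some st) := by
        simp [pvPrevAfter, hgr]
      rw [hP]

-- ===== VERDICT (by name: the statement is the Claim_ definition above) =====
theorem by_state_spec : Claim_equal_by_state := by
  intro s _ hpre
  unfold Spec_by_state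
  have hmem : ∀ e ∈ pvEntries s, e.1 ∈ pvK := by
    intro e he
    rw [pvEntries] at he
    rcases List.mem_map.mp he with ⟨f, hf, rfl⟩
    have hf1 := List.mem_of_mem_filter hf
    have hf2 : f ≠ "" := by simpa using List.of_mem_filter hf
    have hk := hpre f hf1 hf2
    rwa [pvKeys_eq] at hk
  have hB : by_state_alt s
      = PySem.Str.join "\r\n" ((pvC (pvEntries s)).foldl pvBstep ([], none)).1 := by
    simp only [by_state_alt]
    rw [entries_eq, sorted2_eq_lex, sorted_eq_C _ hmem]
    rfl
  have hA : by_state s = PySem.Str.join "\r\n" (pvK.foldl (pvAstep (pvEntries s)) []) := by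
    simp only [by_state]
    rw [pvKeys_eq]
    congr 1
    apply List.foldl_ext
    intro acc st _
    rw [fps_contains, fps_getD]
    by_cases hgr : pvGroup (pvEntries s) st = [] <;>
      simp [pvAstep, pvBody, pvName, hgr]
  rw [hA, hB, pvC,
    main_scan (pvEntries s) pvK [] none (by decide) (fun st _ h => by simp at h)]
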